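-- pv_equiv track=rewrite | github.com/SussyFellow/TURNWAYS-language | turnways.py | turnwaysFlop
-- ===== SOURCE A (Python) =====
-- def turnwaysFlop(text): #takes horizontal text and turns it veritcal
--     lines = text.splitlines()
--     longLine = 0
--     for line in lines:
--         if (len(line) > longLine):
--             longLine = len(line)
--     turnLines = ['']*longLine
--     for line in lines:
--         for i in range(0, longLine):
--             if(i < len(line)):
--                 turnLines[i] += str(line[i])
--             else:
--                 turnLines[i] += ' '
--     turnText = '\n'.join(turnLines)
--     return turnText
-- ===== SOURCE B (Python) =====
-- def turnwaysFlop(text):  # peel columns off iterators: each pass takes one char per line (space once a line is exhausted)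
--     its = [iter(line) for line in text.splitlines()]
--     cols = []
--     while True:
--         col = [next(it, None) for it in its]
--         if all(c is None for c in col):
--             break
--         cols.append(''.join(' ' if c is None else c for c in col))
--     return '\n'.join(cols)
-- ===== Notes on version B (the rewrite author's own statement) =====
-- stated objective: alternative
-- what changed: A precomputes the max line length and fills width-many row accumulators via a per-cell index/bounds branch over range(longLine); B never computes a width or indexes at all: it makes an iterator per line and peels columns, each pass taking the next char of every iterator (space once exhausted) until all are spent.
import Mathlib
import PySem

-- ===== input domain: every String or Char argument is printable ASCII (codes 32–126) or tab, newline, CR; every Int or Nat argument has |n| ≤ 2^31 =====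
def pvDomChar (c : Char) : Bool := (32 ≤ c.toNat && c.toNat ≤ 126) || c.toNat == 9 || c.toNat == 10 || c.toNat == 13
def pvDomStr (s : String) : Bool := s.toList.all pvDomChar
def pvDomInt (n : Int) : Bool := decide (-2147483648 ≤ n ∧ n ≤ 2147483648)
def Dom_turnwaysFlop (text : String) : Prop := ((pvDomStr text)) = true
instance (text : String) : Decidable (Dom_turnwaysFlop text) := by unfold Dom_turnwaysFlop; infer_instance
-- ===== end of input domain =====

-- B replaces A's width computation + per-cell index/bounds loop by a column-peeling loop (no width, no indexing); alternative decomposition, same cost.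

-- ===== PORT A =====
-- one body of A's inner loop: turnLines[i] += line[i] if in range else ' '
def stepA (line : String) (turnLines : List String) (i : Int) : List String :=
  if i < PySem.Str.len line then
    turnLines.set i.toNat
      (PySem.List.pyGetD turnLines i "" ++ String.singleton ((PySem.Str.pyGet? line i).getD ' '))
  else
    turnLines.set i.toNat (PySem.List.pyGetD turnLines i "" ++ " ")

def turnwaysFlop (text : String) : String :=
  let lines := PySem.Str.splitlines text
  let longLine : Int := lines.foldl
    (fun longLine line => if PySem.Str.len line > longLine then PySem.Str.len line else longLine) 0
  let turnLines : List String := List.replicate longLine.toNat ""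
  let turnLines := lines.foldl
    (fun turnLines line => (PySem.List.pyRange 0 longLine 1).foldl (stepA line) turnLines)
    turnLines
  PySem.Str.join "\n" turnLines

-- ===== PORT B =====
-- strings are carried as List Char; line[0] if line else ' ' = headD ' ', line[1:] = tail (exact)
lemma peel_tails_sum_le (ls : List (List Char)) :
    ((ls.map List.tail).map List.length).sum ≤ (ls.map List.length).sum := by
  induction ls with
  | nil => simp
  | cons l t ih =>
    simp only [List.map_cons, List.sum_cons]
    exact Nat.add_le_add (by cases l <;> simp) ih

lemma peel_dec (ls : List (List Char)) (h : ¬ ls.all List.isEmpty = true) :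
    ((ls.map List.tail).map List.length).sum < (ls.map List.length).sum := by
  induction ls with
  | nil => simp at h
  | cons l t ih =>
    simp only [List.map_cons, List.sum_cons]
    by_cases hl : l = []
    · subst hl
      simp only [List.all_cons, List.isEmpty_nil, Bool.true_and] at h
      simpa using Nat.add_lt_add_left (ih h) 0
    · have h1 : l.tail.length < l.length := by
        cases l with
        | nil => exact absurd rfl hl
        | cons a as => simp
      exact Nat.add_lt_add_of_lt_of_le h1 (peel_tails_sum_le t)

-- next(it, None) on the iterator of a line = head? of its remaining suffix; advancing the iterator = tail (exact)
lemma peel_all_none (lines : List (List Char)) :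
    (lines.map List.head?).all Option.isNone = lines.all List.isEmpty := by
  induction lines with
  | nil => rfl
  | cons l t ih => cases l <;> simp_all

-- the while loop: read one char per iterator; stop when all are exhausted, else append the column and continue
def peel (lines : List (List Char)) (cols : List (List Char)) : List (List Char) :=
  if h : (lines.map List.head?).all Option.isNone = true then cols
  else peel (lines.map List.tail)
    (cols ++ [(lines.map List.head?).map (fun c => c.getD ' ')])
termination_by (lines.map List.length).sum
decreasing_by
  simpa using peel_dec lines (by rwa [peel_all_none] at h)

def turnwaysFlop_alt (text : String) : String :=
  PySem.Str.join "\n"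
    ((peel ((PySem.Str.splitlines text).map String.toList) []).map (fun col => String.ofList col))

-- ===== PRECONDITION & SPEC =====
def Spec_turnwaysFlop (text : String) (out : String) : Prop := out = turnwaysFlop_alt text
instance (text : String) (out : String) : Decidable (Spec_turnwaysFlop text out) := by unfold Spec_turnwaysFlop; infer_instance

-- ===== CLAIM (what is proved, stated in full; the proofs are below) =====
def Claim_equal_turnwaysFlop : Prop := ∀ (text : String), Dom_turnwaysFlop text → Spec_turnwaysFlop text (turnwaysFlop text)

-- ===== LEMMAS AND PROOFS =====

-- max line length (foldr form, used to characterise both programs)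
def maxLen (ls : List (List Char)) : Nat := ls.foldr (fun l m => max l.length m) 0

-- the character A appends at row `line`, column j (as a string)
def cellStr (line : String) (j : Nat) : String := String.singleton (line.toList.getD j ' ')

lemma stepA_eq (line : String) (tl : List String) (k : Nat) :
    stepA line tl (↑k) = tl.set k (tl.getD k "" ++ cellStr line k) := by
  unfold stepA cellStr
  rw [PySem.List.pyGetD_of_nonneg tl "" (by positivity), PySem.Str.len_eq,
    PySem.Str.pyGet?_natCast]
  simp only [Int.toNat_natCast]
  split_ifs with h
  · have hk : k < line.toList.length := by exact_mod_cast h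
    simp [List.getD]
  · have hk : ¬ k < line.toList.length := by omega
    simp [List.getD, List.getElem?_eq_none (by omega : line.toList.length ≤ k)]
    rfl

lemma mapIdx_id' (tl : List String) : tl.mapIdx (fun _ s => s) = tl := by
  apply List.ext_getElem <;> simp

lemma innerA_aux (line : String) (tl : List String) (k : Nat) (hk : k ≤ tl.length) :
    ((List.range k).map (fun (j : Nat) => (j : Int))).foldl (stepA line) tl
      = tl.mapIdx (fun j s => if j < k then s ++ cellStr line j else s) := by
  induction k with
  | zero => simp [mapIdx_id']
  | succ k ih =>
    rw [List.range_succ, List.map_append, List.foldl_append, ih (by omega)]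
    simp only [List.map_cons, List.map_nil, List.foldl_cons, List.foldl_nil]
    rw [stepA_eq]
    apply List.ext_getElem
    · simp
    · intro j hj hj'
      have hjlen : j < tl.length := by simpa using hj
      rw [List.getElem_set]
      by_cases hjk : k = j
      · subst hjk
        have hgd : (tl.mapIdx fun j s => if j < k then s ++ cellStr line j else s).getD k ""
            = tl[k] := by
          rw [List.getD, List.getElem?_eq_getElem (by simpa using hjlen)]
          simp [List.getElem_mapIdx]
        simp only [List.getElem_mapIdx, hgd]
        simp
      · simp only [if_neg hjk, List.getElem_mapIdx]
        by_cases hlt : j < k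
        · rw [if_pos hlt, if_pos (by omega)]
        · rw [if_neg hlt, if_neg (by omega)]

lemma innerA_eq (line : String) (tl : List String) :
    (PySem.List.pyRange 0 (↑tl.length) 1).foldl (stepA line) tl
      = tl.mapIdx (fun j s => s ++ cellStr line j) := by
  rw [PySem.List.pyRange_zero_natCast, innerA_aux line tl tl.length (le_refl _)]
  apply List.ext_getElem
  · simp
  · intro j hj hj'
    simp only [List.getElem_mapIdx]
    rw [if_pos (by simpa using hj)]

lemma outerA_eq (ls : List String) (w : Nat) : ∀ tl : List String, tl.length = w →
    ls.foldl (fun tl line => (PySem.List.pyRange 0 (↑w) 1).foldl (stepA line) tl) tl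
      = tl.mapIdx (fun j s => ls.foldl (fun acc line => acc ++ cellStr line j) s) := by
  induction ls with
  | nil => intro tl _; simp [mapIdx_id']
  | cons l ls ih =>
    intro tl htl
    simp only [List.foldl_cons]
    rw [show (PySem.List.pyRange 0 (↑w) 1).foldl (stepA l) tl
          = tl.mapIdx (fun j s => s ++ cellStr l j) from htl ▸ innerA_eq l tl,
      ih _ (by simp [htl]), List.mapIdx_mapIdx]
    rfl

lemma foldl_cell_toList (ls : List String) (j : Nat) : ∀ init : String,
    (ls.foldl (fun acc line => acc ++ cellStr line j) init).toList
      = init.toList ++ ls.map (fun line => line.toList.getD j ' ') := by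
  induction ls with
  | nil => intro init; simp
  | cons l ls ih =>
    intro init
    simp only [List.foldl_cons, List.map_cons]
    rw [ih]
    simp [cellStr]

-- A's running max equals maxLen (generalized accumulator)
lemma foldA_max_aux (lines : List String) : ∀ a : Nat,
    lines.foldl (fun m line => if PySem.Str.len line > m then PySem.Str.len line else m) (↑a)
      = (max a (maxLen (lines.map String.toList)) : Nat) := by
  induction lines with
  | nil => intro a; simp [maxLen]
  | cons l ls ih =>
    intro a
    simp only [List.foldl_cons]
    have hstep : (if PySem.Str.len l > (↑a : Int) then PySem.Str.len l else (↑a : Int))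
        = ((max a l.toList.length : Nat) : Int) := by
      rw [PySem.Str.len_eq]
      split_ifs with h <;> push_cast <;> omega
    rw [hstep, ih]
    congr 1
    simp only [maxLen, List.map_cons, List.foldr_cons]
    omega

lemma foldA_max (lines : List String) :
    lines.foldl (fun m line => if PySem.Str.len line > m then PySem.Str.len line else m) 0
      = (maxLen (lines.map String.toList) : Int) := by
  have := foldA_max_aux lines 0
  simpa using this

-- peel characterisation --------------------------------------------------

lemma maxLen_zero (ls : List (List Char)) : maxLen ls = 0 ↔ ls.all List.isEmpty = true := by
  induction ls with
  | nil => simp [maxLen]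
  | cons l t ih =>
    simp only [maxLen, List.foldr_cons, List.all_cons, Bool.and_eq_true]
    constructor
    · intro h
      have h1 : l.length = 0 := by omega
      have h2 : maxLen t = 0 := by unfold maxLen; omega
      exact ⟨by simp [List.eq_nil_of_length_eq_zero h1], ih.mp h2⟩
    · rintro ⟨h1, h2⟩
      have : l = [] := by simpa [List.isEmpty_iff] using h1
      subst this
      simpa [maxLen] using ih.mpr h2

lemma maxLen_tails (ls : List (List Char)) : maxLen (ls.map List.tail) = maxLen ls - 1 := by
  induction ls with
  | nil => simp [maxLen]
  | cons l t ih =>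
    simp only [maxLen, List.map_cons, List.foldr_cons] at *
    rw [ih]
    have : l.tail.length = l.length - 1 := by cases l <;> simp
    omega

lemma head_getD (l : List Char) : (Function.comp (fun c : Option Char => c.getD ' ') List.head?) l = l.getD 0 ' ' := by cases l <;> rfl

lemma tail_getD (l : List Char) (j : Nat) : l.tail.getD j ' ' = l.getD (j + 1) ' ' := by
  cases l <;> simp [List.getD]

lemma peel_eq : ∀ (n : Nat) (ls : List (List Char)) (cols : List (List Char)), maxLen ls = n →
    peel ls cols = cols ++ (List.range n).map (fun j => ls.map (fun l => l.getD j ' ')) := by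
  intro n
  induction n with
  | zero =>
    intro ls cols h
    rw [peel.eq_def]
    simp only [peel_all_none]
    rw [dif_pos ((maxLen_zero ls).mp h)]
    simp
  | succ n ih =>
    intro ls cols h
    have hne : ¬ ls.all List.isEmpty = true := by
      intro hc
      rw [(maxLen_zero ls).mpr hc] at h
      omega
    rw [peel.eq_def]
    simp only [peel_all_none]
    rw [dif_neg hne]
    have htails : maxLen (ls.map List.tail) = n := by rw [maxLen_tails, h]; omega
    rw [ih _ _ htails, List.range_succ_eq_map, List.map_cons, List.map_map, List.map_map,
      List.append_assoc, List.singleton_append]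
    congr 1
    congr 1
    · exact List.map_congr_left (fun l _ => head_getD l)
    · apply List.map_congr_left
      intro j _
      simp only [Function.comp_apply, List.map_map]
      exact List.map_congr_left (fun l _ => by
        simp only [Function.comp_apply]
        exact tail_getD l j)

lemma core_eq (lines : List String) :
    PySem.Str.join "\n"
      (lines.foldl
        (fun turnLines line =>
          (PySem.List.pyRange 0
            (lines.foldl (fun longLine line =>
              if PySem.Str.len line > longLine then PySem.Str.len line else longLine) 0) 1).foldl
            (stepA line) turnLines)
        (List.replicate (lines.foldl (fun longLine line =>
          if PySem.Str.len line > longLine then PySem.Str.len line else longLine) 0).toNat ""))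
    = PySem.Str.join "\n" ((peel (lines.map String.toList) []).map (fun col => String.ofList col)) := by
  set w : Nat := maxLen (lines.map String.toList) with hw
  rw [foldA_max lines]
  simp only [Int.toNat_natCast]
  rw [outerA_eq lines w (List.replicate w "") (by simp), peel_eq w (lines.map String.toList) [] hw.symm, List.nil_append]
  congr 1
  apply List.ext_getElem
  · simp
  · intro j hj hj'
    simp only [List.getElem_mapIdx, List.getElem_map, List.getElem_range, List.getElem_replicate]
    rw [← String.toList_inj, foldl_cell_toList]
    simp only [List.map_map, Function.comp_def, String.toList_ofList]
    simp

theorem turnwaysFlop_eq_alt (text : String) : turnwaysFlop text = turnwaysFlop_alt text := by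
  unfold turnwaysFlop turnwaysFlop_alt
  exact core_eq (PySem.Str.splitlines text)

-- ===== VERDICT (by name: the statement is the Claim_ definition above) =====
theorem turnwaysFlop_spec : Claim_equal_turnwaysFlop := by
  intro text _
  unfold Spec_turnwaysFlop
  exact turnwaysFlop_eq_alt text
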